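-- pv_equiv track=rewrite | github.com/Sarahsusangeorge/persona-aware-chatbot | training/prepare_data.py | _persona_strings_to_profile
-- ===== SOURCE A (Python) =====
-- def _persona_strings_to_profile(persona_lines: list[str]) -> str:
--     """Convert PersonaChat persona sentences into a structured profile string
--     suitable as a T5 training target."""
--     traits = []
--     tone = "neutral"
--     style = "balanced"
--     emotion = "neutral"
--
--     for line in persona_lines:
--         line_lower = line.lower().strip()
--         traits.append(line.strip().rstrip("."))
--
--         if any(w in line_lower for w in ["formal", "professional", "polite"]):
--             tone = "formal"
--             style = "formal"
--         elif any(w in line_lower for w in ["sarcas", "witty", "ironic", "joke"]):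
--             tone = "sarcastic"
--             style = "casual"
--         elif any(w in line_lower for w in ["empath", "caring", "kind", "support"]):
--             tone = "empathetic"
--             style = "warm"
--
--         if any(w in line_lower for w in ["happy", "optimis", "cheerful", "love"]):
--             emotion = "optimistic"
--         elif any(w in line_lower for w in ["concern", "worr", "anxious"]):
--             emotion = "empathetic"
--
--     summary = ". ".join(persona_lines[:3])
--
--     target = (
--         f"Personality traits: {', '.join(traits[:5])}\n"
--         f"Tone: {tone}\n"
--         f"Communication style: {style}\n"
--         f"Emotional tendency: {emotion}\n"
--         f"Summary: {summary}"
--     )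
--     return target
-- ===== SOURCE B (Python) =====
-- def _tone_style(line):
--     ll = line.lower().strip()
--     if any(w in ll for w in ("formal", "professional", "polite")):
--         return ("formal", "formal")
--     if any(w in ll for w in ("sarcas", "witty", "ironic", "joke")):
--         return ("sarcastic", "casual")
--     if any(w in ll for w in ("empath", "caring", "kind", "support")):
--         return ("empathetic", "warm")
--     return None
--
--
-- def _emotion(line):
--     ll = line.lower().strip()
--     if any(w in ll for w in ("happy", "optimis", "cheerful", "love")):
--         return "optimistic"
--     if any(w in ll for w in ("concern", "worr", "anxious")):
--         return "empathetic"
--     return None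
--
--
-- def _persona_strings_to_profile(persona_lines: list[str]) -> str:
--     traits = [l.strip().rstrip(".") for l in persona_lines[:5]]
--     tone, style = next(
--         (t for t in map(_tone_style, reversed(persona_lines)) if t is not None),
--         ("neutral", "balanced"),
--     )
--     emotion = next(
--         (e for e in map(_emotion, reversed(persona_lines)) if e is not None),
--         "neutral",
--     )
--     summary = ". ".join(persona_lines[:3])
--     return (
--         f"Personality traits: {', '.join(traits)}\n"
--         f"Tone: {tone}\n"
--         f"Communication style: {style}\n"
--         f"Emotional tendency: {emotion}\n"
--         f"Summary: {summary}"
--     )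
-- ===== Notes on version B (the rewrite author's own statement) =====
-- stated objective: simpler
-- what changed: Replaces A's single fused forward fold carrying four mutable state variables (last-match-wins) with a per-line classifier and a first-match reverse scan for tone/style and for emotion, plus a direct comprehension over the first five lines for traits.
import Mathlib
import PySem

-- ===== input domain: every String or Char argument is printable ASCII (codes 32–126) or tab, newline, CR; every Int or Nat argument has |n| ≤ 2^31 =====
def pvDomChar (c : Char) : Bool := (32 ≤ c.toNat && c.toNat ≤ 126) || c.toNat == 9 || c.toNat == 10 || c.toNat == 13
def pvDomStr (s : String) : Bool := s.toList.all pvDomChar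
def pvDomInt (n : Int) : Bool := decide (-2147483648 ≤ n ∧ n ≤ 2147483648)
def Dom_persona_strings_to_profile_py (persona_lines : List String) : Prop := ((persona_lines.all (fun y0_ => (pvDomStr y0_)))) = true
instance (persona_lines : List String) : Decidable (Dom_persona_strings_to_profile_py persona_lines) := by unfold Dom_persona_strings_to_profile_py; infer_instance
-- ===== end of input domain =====

-- B replaces A's fused forward fold over four state variables with per-line classifiers
-- and first-match reverse scans (objective: simpler).


-- ===== PORT A =====
-- s.rstrip(".") — PySem has no rstrip-with-chars primitive; exact hand port (drop '.' from the right).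
def pvRstripDot (s : String) : String :=
  String.ofList ((s.toList.reverse.dropWhile (fun c => c == '.')).reverse)

-- one iteration of A's for-loop body over the state (traits, tone, style, emotion)
def pvStepA (st : List String × String × String × String) (line : String) :
    List String × String × String × String :=
  let line_lower := PySem.Str.strip (PySem.Str.lower line)
  let traits := st.1 ++ [pvRstripDot (PySem.Str.strip line)]
  let toneStyle :=
    if PySem.Str.isIn "formal" line_lower || PySem.Str.isIn "professional" line_lower ||
        PySem.Str.isIn "polite" line_lower then ("formal", "formal")
    else if PySem.Str.isIn "sarcas" line_lower || PySem.Str.isIn "witty" line_lower ||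
        PySem.Str.isIn "ironic" line_lower || PySem.Str.isIn "joke" line_lower then
      ("sarcastic", "casual")
    else if PySem.Str.isIn "empath" line_lower || PySem.Str.isIn "caring" line_lower ||
        PySem.Str.isIn "kind" line_lower || PySem.Str.isIn "support" line_lower then
      ("empathetic", "warm")
    else (st.2.1, st.2.2.1)
  let emotion :=
    if PySem.Str.isIn "happy" line_lower || PySem.Str.isIn "optimis" line_lower ||
        PySem.Str.isIn "cheerful" line_lower || PySem.Str.isIn "love" line_lower then
      "optimistic"
    else if PySem.Str.isIn "concern" line_lower || PySem.Str.isIn "worr" line_lower ||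
        PySem.Str.isIn "anxious" line_lower then "empathetic"
    else st.2.2.2
  (traits, toneStyle.1, toneStyle.2, emotion)

def persona_strings_to_profile_py (persona_lines : List String) : String :=
  let st := persona_lines.foldl pvStepA ([], "neutral", "balanced", "neutral")
  let summary := PySem.Str.join ". " (PySem.List.slice persona_lines none (some 3))
  "Personality traits: " ++ PySem.Str.join ", " (PySem.List.slice st.1 none (some 5)) ++
    "\nTone: " ++ st.2.1 ++
    "\nCommunication style: " ++ st.2.2.1 ++
    "\nEmotional tendency: " ++ st.2.2.2 ++
    "\nSummary: " ++ summary

-- ===== PORT B =====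
def pvToneStyle (line : String) : Option (String × String) :=
  let ll := PySem.Str.strip (PySem.Str.lower line)
  if PySem.Str.isIn "formal" ll || PySem.Str.isIn "professional" ll ||
      PySem.Str.isIn "polite" ll then some ("formal", "formal")
  else if PySem.Str.isIn "sarcas" ll || PySem.Str.isIn "witty" ll ||
      PySem.Str.isIn "ironic" ll || PySem.Str.isIn "joke" ll then some ("sarcastic", "casual")
  else if PySem.Str.isIn "empath" ll || PySem.Str.isIn "caring" ll ||
      PySem.Str.isIn "kind" ll || PySem.Str.isIn "support" ll then some ("empathetic", "warm")
  else none

def pvEmotion (line : String) : Option String :=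
  let ll := PySem.Str.strip (PySem.Str.lower line)
  if PySem.Str.isIn "happy" ll || PySem.Str.isIn "optimis" ll ||
      PySem.Str.isIn "cheerful" ll || PySem.Str.isIn "love" ll then some "optimistic"
  else if PySem.Str.isIn "concern" ll || PySem.Str.isIn "worr" ll ||
      PySem.Str.isIn "anxious" ll then some "empathetic"
  else none

def persona_strings_to_profile_py_alt (persona_lines : List String) : String :=
  let traits := (PySem.List.slice persona_lines none (some 5)).map
    (fun l => pvRstripDot (PySem.Str.strip l))
  let ts := (persona_lines.reverse.findSome? pvToneStyle).getD ("neutral", "balanced")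
  let emotion := (persona_lines.reverse.findSome? pvEmotion).getD "neutral"
  let summary := PySem.Str.join ". " (PySem.List.slice persona_lines none (some 3))
  "Personality traits: " ++ PySem.Str.join ", " traits ++
    "\nTone: " ++ ts.1 ++
    "\nCommunication style: " ++ ts.2 ++
    "\nEmotional tendency: " ++ emotion ++
    "\nSummary: " ++ summary

-- ===== PRECONDITION & SPEC =====
def Spec_persona_strings_to_profile_py (persona_lines : List String) (out : String) : Prop := out = persona_strings_to_profile_py_alt persona_lines
instance (persona_lines : List String) (out : String) : Decidable (Spec_persona_strings_to_profile_py persona_lines out) := by unfold Spec_persona_strings_to_profile_py; infer_instance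

-- ===== CLAIM (what is proved, stated in full; the proofs are below) =====
def Claim_equal_persona_strings_to_profile_py : Prop := ∀ (persona_lines : List String), Dom_persona_strings_to_profile_py persona_lines → Spec_persona_strings_to_profile_py persona_lines (persona_strings_to_profile_py persona_lines)

-- ===== LEMMAS AND PROOFS =====

-- one step of A's loop, expressed through B's per-line classifiers
lemma pvStepA_eq (st : List String × String × String × String) (line : String) :
    pvStepA st line =
      (st.1 ++ [pvRstripDot (PySem.Str.strip line)],
       ((pvToneStyle line).getD (st.2.1, st.2.2.1)).1,
       ((pvToneStyle line).getD (st.2.1, st.2.2.1)).2,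
       (pvEmotion line).getD st.2.2.2) := by
  unfold pvStepA pvToneStyle pvEmotion
  dsimp only
  split_ifs <;> rfl

-- A's whole fold, characterised: traits is a map, tone/style/emotion are last-match-wins
lemma pvFoldA_eq (xs : List String) (tr : List String) (t s e : String) :
    xs.foldl pvStepA (tr, t, s, e) =
      (tr ++ xs.map (fun l => pvRstripDot (PySem.Str.strip l)),
       ((xs.reverse.findSome? pvToneStyle).getD (t, s)).1,
       ((xs.reverse.findSome? pvToneStyle).getD (t, s)).2,
       (xs.reverse.findSome? pvEmotion).getD e) := by
  induction xs generalizing tr t s e with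
  | nil => simp
  | cons l xs ih =>
    simp only [List.foldl_cons, pvStepA_eq, List.reverse_cons, List.findSome?_append]
    rw [ih]
    cases hts : xs.reverse.findSome? pvToneStyle <;>
      cases he : xs.reverse.findSome? pvEmotion <;>
        simp [List.findSome?_cons, Option.getD]
    all_goals (cases hl : pvToneStyle l <;> cases hl2 : pvEmotion l <;> simp)

theorem persona_strings_to_profile_py_spec_aux (persona_lines : List String) :
    persona_strings_to_profile_py persona_lines =
      persona_strings_to_profile_py_alt persona_lines := by
  unfold persona_strings_to_profile_py persona_strings_to_profile_py_alt
  rw [pvFoldA_eq]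
  simp [PySem.List.slice_to, List.map_take]

-- ===== VERDICT (by name: the statement is the Claim_ definition above) =====
theorem persona_strings_to_profile_py_spec : Claim_equal_persona_strings_to_profile_py := by
  intro persona_lines _
  exact persona_strings_to_profile_py_spec_aux persona_lines
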